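-- pv_equiv track=rewrite | github.com/SlnkvDns/OMGTU | Olimpiad/tau_kita.py | translate_phrase
-- ===== SOURCE A (Python) =====
-- def translate_phrase(phrase):
--     phrase = phrase.split()
--     temp = phrase[0]
--     k = n = len(phrase)
--     if n % 2 == 0:
--         phrase = phrase[1:]
--         k -= 1
--     new_phrase = [phrase[k//2]]
--     for i in range(1, k//2 + 1):
--         new_phrase.append(phrase[k//2-i])
--         new_phrase.append(phrase[k//2+i])
--     if n % 2 == 0:
--         new_phrase.append(temp)
--     return new_phrase
-- ===== SOURCE B (Python) =====
-- def translate_phrase(phrase):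
--     words = phrase.split()
--     if len(words) % 2 == 0:
--         head, tail = words[0], words[1:]
--         return inside_out(tail) + [head]
--     return inside_out(words)
--
--
-- def inside_out(ws):
--     # recursively peel the outermost pair; the result is built from the
--     # innermost word outward, so the center comes first and the extremes last
--     if len(ws) <= 1:
--         return list(ws)
--     return inside_out(ws[1:-1]) + [ws[0], ws[-1]]
-- ===== Notes on version B (the rewrite author's own statement) =====
-- stated objective: alternative
-- what changed: Replaces A's center computation and index-arithmetic outward walk with a recursion that repeatedly peels the outermost pair (first and last word) and builds the answer from the innermost word outward, with the even case handled by setting the first word aside; no center index or offset arithmetic remains.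
import Mathlib
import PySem

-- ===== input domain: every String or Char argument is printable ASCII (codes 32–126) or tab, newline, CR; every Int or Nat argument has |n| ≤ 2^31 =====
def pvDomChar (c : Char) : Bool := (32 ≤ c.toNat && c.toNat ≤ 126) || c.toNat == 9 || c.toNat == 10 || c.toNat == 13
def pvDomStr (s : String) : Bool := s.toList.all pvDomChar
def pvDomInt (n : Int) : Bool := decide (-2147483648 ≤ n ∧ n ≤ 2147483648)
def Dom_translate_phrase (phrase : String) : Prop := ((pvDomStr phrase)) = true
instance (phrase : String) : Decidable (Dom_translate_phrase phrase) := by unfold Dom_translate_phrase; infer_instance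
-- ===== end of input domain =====

-- B rearranges the words by recursively peeling the outermost pair of the word list and
-- building the result from the innermost word outward, instead of A's center-index outward
-- walk; same result, different decomposition (objective: alternative).
-- Both programs raise IndexError on a whitespace-only phrase; Pre_ excludes exactly those.

-- ===== PORT A =====
def translate_phrase (phrase : String) : List String :=
  let ws := PySem.Str.split₀ phrase
  let temp := (PySem.List.pyGet? ws 0).getD ""          -- phrase[0]; IndexError (excluded by Pre_) if empty
  let n : Int := ws.length
  let ws := if PySem.Int.mod n 2 == 0 then PySem.List.slice ws (some 1) none else ws
  let k : Int := if PySem.Int.mod n 2 == 0 then n - 1 else n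
  let c := PySem.Int.floordiv k 2
  let body := (PySem.List.pyRange 1 (c + 1) 1).foldl
    (fun acc i => acc ++ [(PySem.List.pyGet? ws (c - i)).getD "", (PySem.List.pyGet? ws (c + i)).getD ""])
    [(PySem.List.pyGet? ws c).getD ""]
  if PySem.Int.mod n 2 == 0 then body ++ [temp] else body

-- ===== PORT B =====
-- inside_out: peel the outermost pair (ws[0], ws[-1]) and recurse on ws[1:-1]
def pvInsideOut (ws : List String) : List String :=
  if ws.length ≤ 1 then ws
  else pvInsideOut ((ws.drop 1).dropLast) ++ [ws.headD "", ws.getLastD ""]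
termination_by ws.length
decreasing_by simp only [List.length_dropLast, List.length_drop]; omega

def translate_phrase_alt (phrase : String) : List String :=
  let ws := PySem.Str.split₀ phrase
  if ws.length % 2 == 0 then
    match ws with
    | [] => []                                   -- B raises IndexError here; excluded by Pre_
    | head :: tail => pvInsideOut tail ++ [head]
  else pvInsideOut ws

-- ===== PRECONDITION & SPEC =====
-- Pre_ excludes exactly the whitespace-only phrases, on which both A and B raise IndexError.
def Pre_translate_phrase (phrase : String) : Prop := PySem.Str.split₀ phrase ≠ []
instance (phrase : String) : Decidable (Pre_translate_phrase phrase) := by unfold Pre_translate_phrase; infer_instance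
def pvWitness_translate_phrase : String := "alpha beta gamma delta"

def Spec_translate_phrase (phrase : String) (out : List String) : Prop := out = translate_phrase_alt phrase
instance (phrase : String) (out : List String) : Decidable (Spec_translate_phrase phrase out) := by unfold Spec_translate_phrase; infer_instance

-- ===== CLAIM (what is proved, stated in full; the proofs are below) =====
def Claim_equal_translate_phrase : Prop := ∀ (phrase : String), Dom_translate_phrase phrase → Pre_translate_phrase phrase → Spec_translate_phrase phrase (translate_phrase phrase)

-- ===== LEMMAS AND PROOFS =====

-- elements of the doubly-peeled list, by index
lemma getD_peel (L : List String) (j : Nat) (hj : j < L.length - 2) :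
    ((L.drop 1).dropLast).getD j "" = L.getD (j + 1) "" := by
  have h1 : j < ((L.drop 1).dropLast).length := by
    simp only [List.length_dropLast, List.length_drop]; omega
  have h2 : j + 1 < L.length := by omega
  rw [List.getD_eq_getElem _ _ h1, List.getD_eq_getElem _ _ h2,
      List.getElem_dropLast, List.getElem_drop]
  congr 1; omega

-- closed form of pvInsideOut on odd-length lists: center first, then outward pairs
lemma pvInsideOut_odd (c : Nat) (L : List String) (hL : L.length = 2 * c + 1) :
    pvInsideOut L
      = L.getD c "" ::
        (List.range c).flatMap (fun j => [L.getD (c - 1 - j) "", L.getD (c + 1 + j) ""]) := by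
  induction c generalizing L with
  | zero =>
      obtain ⟨x, hx⟩ : ∃ x, L = [x] := by
        cases L with
        | nil => simp at hL
        | cons a t => cases t with
          | nil => exact ⟨a, rfl⟩
          | cons b u => simp at hL
      rw [hx]; rw [pvInsideOut]; simp
  | succ c ih =>
      have hlen : ¬ L.length ≤ 1 := by omega
      rw [pvInsideOut, if_neg hlen]
      set M := (L.drop 1).dropLast with hM
      have hMlen : M.length = 2 * c + 1 := by
        simp only [hM, List.length_dropLast, List.length_drop]; omega
      rw [ih M hMlen]
      have hcent : M.getD c "" = L.getD (c + 1) "" := getD_peel L c (by omega)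
      have hhead : L.headD "" = L.getD 0 "" := by
        cases L with | nil => simp at hL | cons a t => simp
      have hlast : L.getLastD "" = L.getD (2 * c + 2) "" := by
        rw [List.getLastD_eq_getLast?, List.getLast?_eq_getElem?]
        rw [List.getD_eq_getElem?_getD]
        have : L.length - 1 = 2 * c + 2 := by omega
        rw [this]
      rw [hcent, hhead, hlast]
      rw [List.range_succ, List.flatMap_append]
      simp only [List.flatMap_cons, List.flatMap_nil, List.append_nil, List.cons_append]
      congr 1
      · congr 1
        · apply List.flatMap_congr  -- pointwise equality of the pair maps
          intro j hj
          have hjc : j < c := List.mem_range.mp hj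
          have e1 : ((L.drop 1).dropLast).getD (c - 1 - j) "" = L.getD (c - j) "" := by
            rw [getD_peel L (c - 1 - j) (by omega)]; congr 1; omega
          have e2 : ((L.drop 1).dropLast).getD (c + 1 + j) "" = L.getD (c + 2 + j) "" := by
            rw [getD_peel L (c + 1 + j) (by omega)]; congr 1; omega
          rw [← hM] at e1 e2
          rw [e1, e2]
          congr 2
        · have i1 : c + 1 - 1 - c = 0 := by omega
          have i2 : c + 1 + 1 + c = 2 * c + 2 := by omega
          rw [i1, i2]

-- A's outward-walk loop equals pvInsideOut on an odd-length list
lemma core_eq (L : List String) (c : Nat) (hL : L.length = 2 * c + 1) :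
    (PySem.List.pyRange 1 ((c : Int) + 1) 1).foldl
      (fun acc i => acc ++ [(PySem.List.pyGet? L ((c : Int) - i)).getD "",
                            (PySem.List.pyGet? L ((c : Int) + i)).getD ""])
      [(PySem.List.pyGet? L (c : Int)).getD ""]
      = pvInsideOut L := by
  rw [PySem.List.foldl_append_eq_flatMap, PySem.List.pyRange_one]
  have hrange : (((c : Int) + 1) - 1).toNat = c := by omega
  rw [hrange, List.flatMap_map]
  rw [pvInsideOut_odd c L hL]
  have hhead : (PySem.List.pyGet? L (c : Int)).getD "" = L.getD c "" := by
    simp [PySem.List.pyGet?_natCast, List.getD_eq_getElem?_getD]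
  rw [hhead]
  simp only [List.singleton_append, List.cons.injEq, true_and]
  apply List.flatMap_congr
  intro j hj
  have hjc : j < c := List.mem_range.mp hj
  have h1 : (c : Int) - (1 + (j : Int)) = ((c - 1 - j : Nat) : Int) := by omega
  have h2 : (c : Int) + (1 + (j : Int)) = ((c + 1 + j : Nat) : Int) := by push_cast; ring
  rw [h1, h2, PySem.List.pyGet?_natCast, PySem.List.pyGet?_natCast]
  simp [List.getD_eq_getElem?_getD]

-- ===== VERDICT (by name: the statement is the Claim_ definition above) =====
theorem translate_phrase_spec : Claim_equal_translate_phrase := by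
  intro phrase _ hpre
  unfold Pre_translate_phrase at hpre
  show translate_phrase phrase = translate_phrase_alt phrase
  unfold translate_phrase translate_phrase_alt
  dsimp only
  set ws := PySem.Str.split₀ phrase with hws
  have hmod : PySem.Int.mod ((ws.length : Int)) 2 = ((ws.length % 2 : Nat) : Int) := by
    exact_mod_cast PySem.Int.mod_natCast ws.length 2
  rcases Nat.even_or_odd ws.length with he | ho
  · -- even number of words
    have h0 : ws.length % 2 = 0 := Nat.even_iff.mp he
    obtain ⟨w, rest, hwr⟩ := List.exists_cons_of_ne_nil hpre
    rw [hwr] at hmod h0 ⊢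
    have hA : (PySem.Int.mod (((w :: rest).length : Int)) 2 == 0) = true := by
      rw [hmod, h0]; decide
    have hB : ((w :: rest).length % 2 == 0) = true := by
      rw [h0]; decide
    rw [hA, hB]
    simp only [if_true]
    have hslice : PySem.List.slice (w :: rest) (some 1) none = rest :=
      PySem.List.slice_from_one (w :: rest)
    have htemp : (PySem.List.pyGet? (w :: rest) 0).getD "" = w := by
      rw [PySem.List.pyGet?_zero_cons]; rfl
    have hodd : rest.length % 2 = 1 := by
      have : (rest.length + 1) % 2 = 0 := by simpa using h0
      omega
    have hk : ((((w :: rest).length : Int)) - 1) = (rest.length : Int) := by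
      simp only [List.length_cons]; push_cast; ring
    have hfd : PySem.Int.floordiv ((rest.length : Int)) 2 = ((rest.length / 2 : Nat) : Int) := by
      exact_mod_cast PySem.Int.floordiv_natCast rest.length 2
    rw [hslice, htemp, hk, hfd]
    rw [core_eq rest (rest.length / 2) (by omega)]
  · -- odd number of words
    have h1 : ws.length % 2 = 1 := Nat.odd_iff.mp ho
    have hA : (PySem.Int.mod ((ws.length : Int)) 2 == 0) = false := by
      rw [hmod, h1]; decide
    have hB : (ws.length % 2 == 0) = false := by rw [h1]; decide
    rw [hA, hB]
    simp only [if_false, Bool.false_eq_true]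
    have hfd : PySem.Int.floordiv ((ws.length : Int)) 2 = ((ws.length / 2 : Nat) : Int) := by
      exact_mod_cast PySem.Int.floordiv_natCast ws.length 2
    rw [hfd]
    rw [core_eq ws (ws.length / 2) (by omega)]
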